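-- pv_equiv track=rewrite | github.com/holgern/codecrate | codecrate/security.py | _mask_text_preserving_structure
-- ===== SOURCE A (Python) =====
-- def _mask_text_preserving_structure(text: str) -> str:
--     out: list[str] = []
--     for ch in text:
--         if ch in {"\n", "\r", "\t", " "}:
--             out.append(ch)
--         else:
--             out.append("x")
--     return "".join(out)
-- ===== SOURCE B (Python) =====
-- import re
--
-- def _mask_text_preserving_structure(text: str) -> str:
--     return re.sub(r"[^\n\r\t ]", "x", text)
-- ===== Notes on version B (the rewrite author's own statement) =====
-- stated objective: idiomatic
-- what changed: Replaces the explicit per-character loop with list accumulator and join by a single regex substitution masking every character outside the preserved whitespace class [\n\r\t ].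
import Mathlib
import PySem

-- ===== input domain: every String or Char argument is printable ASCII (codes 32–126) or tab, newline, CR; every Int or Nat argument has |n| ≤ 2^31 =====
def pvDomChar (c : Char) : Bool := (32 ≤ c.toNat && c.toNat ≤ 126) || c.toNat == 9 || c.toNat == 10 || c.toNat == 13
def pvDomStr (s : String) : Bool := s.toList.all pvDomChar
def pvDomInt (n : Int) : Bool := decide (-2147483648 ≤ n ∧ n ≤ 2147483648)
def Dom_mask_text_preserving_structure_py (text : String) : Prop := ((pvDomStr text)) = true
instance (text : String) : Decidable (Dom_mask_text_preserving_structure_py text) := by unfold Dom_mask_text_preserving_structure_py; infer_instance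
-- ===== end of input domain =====

-- B replaces A's explicit loop+list+join with a single regex substitution masking every
-- character outside the whitespace class [\n\r\t ]; same return value, idiomatic.
-- ===== PORT A =====
def mask_text_preserving_structure_py (text : String) : String :=
  let out : List String := text.toList.foldl (fun out ch =>
    out ++ [if ch = '\n' || ch = '\r' || ch = '\t' || ch = ' ' then ch.toString else "x"]) []
  PySem.Str.join "" out

-- ===== PORT B =====
-- re.sub with a single-character negated class [^\n\r\t ] replaces each char outside the
-- class by 'x'; ported as the corresponding per-character map.
def mask_text_preserving_structure_py_alt (text : String) : String :=
  String.ofList (text.toList.map (fun c =>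
    if c = '\n' || c = '\r' || c = '\t' || c = ' ' then c else 'x'))

-- ===== PRECONDITION & SPEC =====
def Spec_mask_text_preserving_structure_py (text : String) (out : String) : Prop := out = mask_text_preserving_structure_py_alt text
instance (text : String) (out : String) : Decidable (Spec_mask_text_preserving_structure_py text out) := by unfold Spec_mask_text_preserving_structure_py; infer_instance

-- ===== CLAIM (what is proved, stated in full; the proofs are below) =====
def Claim_equal_mask_text_preserving_structure_py : Prop := ∀ (text : String), Dom_mask_text_preserving_structure_py text → Spec_mask_text_preserving_structure_py text (mask_text_preserving_structure_py text)

-- ===== LEMMAS AND PROOFS =====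
lemma mask_foldl_append (l : List Char) (acc : List String) (f : Char → String) :
    l.foldl (fun out ch => out ++ [f ch]) acc = acc ++ l.map f := by
  induction l generalizing acc with
  | nil => simp
  | cons c cs ih => simp [List.foldl, ih]

lemma mask_join_map (l : List Char) (f : Char → String) (g : Char → Char)
    (hfg : ∀ c, (f c).toList = [g c]) :
    PySem.Str.join "" (l.map f) = String.ofList (l.map g) := by
  have h1 : (PySem.Str.join "" (l.map f)).toList = l.map g := by
    rw [PySem.Str.toList_join]
    have : (l.map f).map String.toList = (l.map g).map (fun c => [c]) := by
      simp only [List.map_map]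
      exact List.map_congr_left (fun c _ => hfg c)
    simp only [this]
    exact PySem.Chars.join_nil_singletons _
  calc PySem.Str.join "" (l.map f)
      = String.ofList (PySem.Str.join "" (l.map f)).toList := by
        rw [String.ofList_toList]
    _ = String.ofList (l.map g) := by rw [h1]

-- ===== VERDICT (by name: the statement is the Claim_ definition above) =====
theorem mask_text_preserving_structure_py_spec : Claim_equal_mask_text_preserving_structure_py := by
  intro text _
  unfold Spec_mask_text_preserving_structure_py
  unfold mask_text_preserving_structure_py mask_text_preserving_structure_py_alt
  rw [mask_foldl_append, List.nil_append]
  exact mask_join_map _ _ _ (fun c => by split_ifs <;> simp)
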